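-- pv_equiv track=rewrite | github.com/Edinas09/Challenges | venv/ShorterTrip.py | soluction
-- ===== SOURCE A (Python) =====
-- def soluction(A):
--     tours = set(A)
--     countlist = list()
--     for index, _ in enumerate(A):
--         tours_intern = set()
--         count = 0
--
--         for sec_value in range(index, len(A)):
--
--             tours_intern.add(int(A[sec_value]))
--             count = count + 1
--             if tours_intern == tours:
--                 countlist.append(count)
--     return min(countlist)
-- ===== SOURCE B (Python) =====
-- def soluction(A):
--     n = len(A)
--     need = len(set(A))
--     counts = {}
--     have = 0
--     best = n
--     j = 0
--     for l in range(n):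
--         while j < n and have < need:
--             x = A[j]
--             counts[x] = counts.get(x, 0) + 1
--             if counts[x] == 1:
--                 have += 1
--             j += 1
--         if have < need:
--             break
--         if j - l < best:
--             best = j - l
--         x = A[l]
--         counts[x] = counts[x] - 1
--         if counts[x] == 0:
--             have -= 1
--     return best
-- ===== Notes on version B (the rewrite author's own statement) =====
-- stated objective: faster
-- what changed: Replaced the enumerate-all-covering-windows double loop (which appends every covering window length and takes the min of the collected list) by a two-pointer sliding window with a count dictionary and a distinct-coverage counter, computing the minimal covering window length in one pass.
import Mathlib
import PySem

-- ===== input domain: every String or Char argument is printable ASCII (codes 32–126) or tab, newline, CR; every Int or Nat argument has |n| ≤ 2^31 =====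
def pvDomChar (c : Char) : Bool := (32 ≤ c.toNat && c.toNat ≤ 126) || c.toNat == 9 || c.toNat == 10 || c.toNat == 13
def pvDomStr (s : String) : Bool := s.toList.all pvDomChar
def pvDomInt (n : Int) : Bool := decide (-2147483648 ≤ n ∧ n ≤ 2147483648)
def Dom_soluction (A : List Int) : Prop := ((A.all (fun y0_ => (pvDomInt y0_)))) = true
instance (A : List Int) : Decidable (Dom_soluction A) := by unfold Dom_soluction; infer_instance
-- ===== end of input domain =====

-- B replaces A's enumerate-all-covering-windows double loop by a one-pass two-pointer
-- sliding window with a count dictionary (objective: faster).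

-- ===== PORT A =====
-- inner 'for sec_value in range(index, len(A))' loop; A[sec_value] is always in range, so pyGetD is exact
def soluctionInner (A : List Int) (tours : PySem.Set Int) (index : Int) (cl : List Int) : List Int :=
  ((PySem.List.pyRange index (A.length : Int) 1).foldl
    (fun (s : PySem.Set Int × Int × List Int) sec =>
      let ti := PySem.Set.add s.1 (PySem.List.pyGetD A sec 0)
      let count := s.2.1 + 1
      if PySem.Set.equal ti tours then (ti, count, s.2.2 ++ [count]) else (ti, count, s.2.2))
    (PySem.Set.empty, 0, cl)).2.2

def soluction (A : List Int) : Int :=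
  let tours := PySem.Set.ofList A
  let countlist := (PySem.List.enumerate A).foldl (fun cl p => soluctionInner A tours p.1 cl) []
  (PySem.List.min? countlist (fun x => x)).getD 0   -- min([]) raises ValueError: excluded by Pre_

-- ===== PORT B =====
-- the 'while j < n and have < need' loop; A[j] always in range here, pyGetD exact
def bAdvance (A : List Int) (n : Nat) (need : Int) (j : Nat) (counts : PySem.Dict Int Int)
    (hv : Int) : Nat × PySem.Dict Int Int × Int :=
  if h : j < n ∧ hv < need then
    let x := PySem.List.pyGetD A (j : Int) 0
    let c := counts.getD x 0 + 1
    let counts' := counts.insert x c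
    let hv' := if c = 1 then hv + 1 else hv
    bAdvance A n need (j+1) counts' hv'
  else (j, counts, hv)
termination_by n - j
decreasing_by omega

-- the 'for l in range(n)' loop with its early break
def bLoop (A : List Int) (n : Nat) (need : Int) (l j : Nat) (counts : PySem.Dict Int Int)
    (hv : Int) (best : Int) : Int :=
  if hl : l < n then
    let r := bAdvance A n need j counts hv
    if r.2.2 < need then best
    else
      let best' := if (r.1 : Int) - (l : Int) < best then (r.1 : Int) - (l : Int) else best
      let x := PySem.List.pyGetD A (l : Int) 0
      let c := r.2.1.getD x 0 - 1
      bLoop A n need (l+1) r.1 (r.2.1.insert x c) (if c = 0 then r.2.2 - 1 else r.2.2) best'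
  else best
termination_by n - l

def soluction_alt (A : List Int) : Int :=
  let n := A.length
  let need := PySem.Set.len (PySem.Set.ofList A)
  bLoop A n need 0 0 PySem.Dict.empty 0 (n : Int)

-- ===== PRECONDITION & SPEC =====
-- Pre_ excludes only the empty list, on which A raises ValueError (min of an empty list).
def Pre_soluction (A : List Int) : Prop := A ≠ []
instance (A : List Int) : Decidable (Pre_soluction A) := by unfold Pre_soluction; infer_instance
def pvWitness_soluction : List Int := [1, 2, 1]


def Spec_soluction (A : List Int) (out : Int) : Prop := out = soluction_alt A
instance (A : List Int) (out : Int) : Decidable (Spec_soluction A out) := by unfold Spec_soluction; infer_instance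

-- ===== CLAIM (what is proved, stated in full; the proofs are below) =====
def Claim_equal_soluction : Prop := ∀ (A : List Int), Dom_soluction A → Pre_soluction A → Spec_soluction A (soluction A)

-- ===== LEMMAS AND PROOFS =====

-- the window A[l:j]
def win (A : List Int) (l j : Nat) : List Int := (A.take j).drop l

-- "the window A[l:j] contains every value of A"
def covP (A : List Int) (l j : Nat) : Prop := ∀ x ∈ A, x ∈ win A l j

-- number of distinct values of a list, as an Int
def dcount (w : List Int) : Int := ((PySem.Set.ofList w).length : Int)

-- "y is the length of some covering window of A"
def SS (A : List Int) (y : Int) : Prop :=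
  ∃ l j : Nat, l < j ∧ j ≤ A.length ∧ covP A l j ∧ y = (j : Int) - (l : Int)

theorem win_eq (A : List Int) (l j : Nat) : win A l j = (A.drop l).take (j - l) := by
  simp [win, List.drop_take]

theorem win_subset (A : List Int) (l j : Nat) : win A l j ⊆ A :=
  fun x hx => (A.take_subset j) ((A.take j).drop_subset l hx)

theorem win_self (A : List Int) (l : Nat) : win A l l = [] := by
  simp [win_eq]

theorem win_mono (A : List Int) (l : Nat) {j j' : Nat} (h : j ≤ j') :
    win A l j ⊆ win A l j' := by
  rw [win_eq, win_eq]
  intro x hx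
  have : (A.drop l).take (j - l) = ((A.drop l).take (j' - l)).take (j - l) := by
    rw [List.take_take]
    congr 1
    omega
  rw [this] at hx
  exact ((A.drop l).take (j' - l)).take_subset _ hx

theorem win_anti (A : List Int) {l l' : Nat} (j : Nat) (h : l' ≤ l) :
    win A l j ⊆ win A l' j := by
  intro x hx
  have : win A l j = (win A l' j).drop (l - l') := by
    simp [win, List.drop_drop]
    congr 1
    omega
  rw [this] at hx
  exact (win A l' j).drop_subset _ hx

theorem covP_mono (A : List Int) {l j j' : Nat} (hc : covP A l j) (h : j ≤ j') :
    covP A l j' := fun x hx => win_mono A l h (hc x hx)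

theorem covP_anti (A : List Int) {l l' j : Nat} (hc : covP A l j) (h : l' ≤ l) :
    covP A l' j := fun x hx => win_anti A j h (hc x hx)

theorem covP_top (A : List Int) : covP A 0 A.length := by
  intro x hx
  simpa [win] using hx

theorem covP_pos (A : List Int) {l j : Nat} (hA : A ≠ []) (hc : covP A l j) : l < j := by
  obtain ⟨x, hx⟩ := List.exists_mem_of_ne_nil A hA
  have hxw := hc x hx
  by_contra hlj
  rw [win_eq] at hxw
  have : j - l = 0 := by omega
  simp [this] at hxw

theorem win_succ (A : List Int) {l j : Nat} (hlj : l ≤ j) (hj : j < A.length) :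
    win A l (j + 1) = win A l j ++ [A[j]] := by
  unfold win
  rw [List.take_succ]
  have : A[j]?.toList = [A[j]] := by simp [List.getElem?_eq_getElem hj]
  rw [this, List.drop_append_of_le_length (by simp; omega)]

theorem win_cons (A : List Int) {l j : Nat} (hlj : l < j) (hl : l < A.length) :
    win A l j = A[l] :: win A (l + 1) j := by
  unfold win
  have hlen : l < (A.take j).length := by simp; omega
  rw [List.drop_eq_getElem_cons hlen]
  congr 1
  exact List.getElem_take

theorem dcount_eq (w : List Int) : dcount w = (w.toFinset.card : Int) := by
  have hnd := PySem.Set.nodup_ofList w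
  have hfs : (PySem.Set.ofList w).toFinset = w.toFinset := by
    ext x
    simp [PySem.Set.mem_ofList]
  rw [dcount, ← List.toFinset_card_of_nodup hnd, hfs]

theorem toFinset_subset_of_subset {w A : List Int} (h : w ⊆ A) : w.toFinset ⊆ A.toFinset := by
  intro x hx
  rw [List.mem_toFinset] at *
  exact h hx

theorem dcount_le (w A : List Int) (h : w ⊆ A) : dcount w ≤ dcount A := by
  rw [dcount_eq, dcount_eq]
  exact_mod_cast Finset.card_le_card (toFinset_subset_of_subset h)

theorem dcount_full (w A : List Int) (h : w ⊆ A) :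
    dcount w = dcount A ↔ ∀ x ∈ A, x ∈ w := by
  rw [dcount_eq, dcount_eq]
  constructor
  · intro heq x hx
    have hcard : A.toFinset.card ≤ w.toFinset.card := by exact_mod_cast heq.ge
    have := Finset.eq_of_subset_of_card_le (toFinset_subset_of_subset h) hcard
    rw [← List.mem_toFinset, ← this, List.mem_toFinset] at hx
    exact hx
  · intro hall
    have : w.toFinset = A.toFinset := by
      apply Finset.Subset.antisymm (toFinset_subset_of_subset h)
      intro x hx
      rw [List.mem_toFinset] at *
      exact hall x hx
    rw [this]

theorem dcount_lt_iff (A : List Int) (l j : Nat) :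
    dcount (win A l j) < dcount A ↔ ¬ covP A l j := by
  have hle := dcount_le _ _ (win_subset A l j)
  have hiff := dcount_full _ _ (win_subset A l j)
  constructor
  · intro hlt hc
    exact absurd (hiff.mpr hc) (by omega)
  · intro hc
    rcases lt_or_eq_of_le hle with h | h
    · exact h
    · exact absurd (hiff.mp h) hc

theorem dcount_append (w : List Int) (a : Int) :
    dcount (w ++ [a]) = dcount w + (if a ∈ w then 0 else 1) := by
  rw [dcount_eq, dcount_eq]
  by_cases h : a ∈ w
  · have : (w ++ [a]).toFinset = w.toFinset := by
      simp [List.toFinset_append, Finset.union_eq_left, List.mem_toFinset, h]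
    simp [this, h]
  · have : (w ++ [a]).toFinset = insert a w.toFinset := by
      simp [List.toFinset_append, Finset.union_comm]
    rw [this, Finset.card_insert_of_notMem (by simp [List.mem_toFinset, h])]
    simp [h]

theorem dcount_cons (a : Int) (t : List Int) :
    dcount (a :: t) = dcount t + (if a ∈ t then 0 else 1) := by
  rw [dcount_eq, dcount_eq]
  by_cases h : a ∈ t
  · have : (a :: t).toFinset = t.toFinset := by
      simp [List.toFinset_cons, Finset.insert_eq_self, List.mem_toFinset, h]
    simp [this, h]
  · rw [List.toFinset_cons, Finset.card_insert_of_notMem (by simp [List.mem_toFinset, h])]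
    simp [h]

theorem need_eq (A : List Int) : PySem.Set.len (PySem.Set.ofList A) = dcount A := by
  rw [PySem.Set.len_eq]
  rfl

-- loop invariant of B's window state: counts is the multiset of the window, hv its distinct count
def CI (A : List Int) (l j : Nat) (counts : PySem.Dict Int Int) (hv : Int) : Prop :=
  (∀ x : Int, counts.getD x 0 = ((win A l j).count x : Int)) ∧ hv = dcount (win A l j)

theorem dict_getD_empty (x : Int) : (PySem.Dict.empty : PySem.Dict Int Int).getD x 0 = 0 := by
  simp [PySem.Dict.empty, PySem.Dict.getD, PySem.Dict.get?]

theorem bAdvance_spec (A : List Int) (l : Nat) :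
    ∀ (k j : Nat) (counts : PySem.Dict Int Int) (hv : Int),
      A.length - j = k → l ≤ j → j ≤ A.length → CI A l j counts hv →
      j ≤ (bAdvance A A.length (dcount A) j counts hv).1 ∧
      (bAdvance A A.length (dcount A) j counts hv).1 ≤ A.length ∧
      CI A l (bAdvance A A.length (dcount A) j counts hv).1
        (bAdvance A A.length (dcount A) j counts hv).2.1
        (bAdvance A A.length (dcount A) j counts hv).2.2 ∧
      (∀ m, j ≤ m → m < (bAdvance A A.length (dcount A) j counts hv).1 → ¬ covP A l m) ∧
      ((bAdvance A A.length (dcount A) j counts hv).1 = A.length ∨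
        covP A l (bAdvance A A.length (dcount A) j counts hv).1) := by
  intro k
  induction k with
  | zero =>
    intro j counts hv hk hlj hj hci
    have hj' : j = A.length := by omega
    have hcond : ¬ (j < A.length ∧ hv < dcount A) := by omega
    rw [bAdvance, dif_neg hcond]
    exact ⟨le_refl _, hj, hci, fun m h1 h2 => absurd h2 (by omega), Or.inl hj'⟩
  | succ k ih =>
    intro j counts hv hk hlj hj hci
    have hjn : j < A.length := by omega
    by_cases hlt : hv < dcount A
    · -- advance one step
      obtain ⟨hcnt, hhv⟩ := hci
      have hx : PySem.List.pyGetD A (j : Int) 0 = A[j] := by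
        rw [PySem.List.pyGetD_natCast, List.getD_eq_getElem _ _ hjn]
      have hwin : win A l (j + 1) = win A l j ++ [A[j]] := win_succ A hlj hjn
      have hnotcov : ¬ covP A l j := by
        rw [← dcount_lt_iff]
        omega
      have hcond : j < A.length ∧ hv < dcount A := ⟨hjn, hlt⟩
      rw [bAdvance, dif_pos hcond]
      simp only [hx]
      set c := counts.getD A[j] 0 + 1 with hc
      have hci' : CI A l (j + 1) (counts.insert A[j] c)
          (if c = 1 then hv + 1 else hv) := by
        constructor
        · intro y
          rw [PySem.Dict.getD_insert]
          by_cases hy : y = A[j]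
          · subst hy
            rw [if_pos rfl, hwin, List.count_append]
            simp [hcnt, hc]
          · rw [if_neg hy, hwin, List.count_append]
            have : [A[j]].count y = 0 := by
              simp [List.count_singleton]
              intro h
              exact hy (by simp [h])
            simp [this, hcnt]
        · have hmem : A[j] ∈ win A l j ↔ c ≠ 1 := by
            rw [hc, hcnt]
            rw [← List.count_pos_iff]
            omega
          rw [hwin, dcount_append]
          by_cases hm : A[j] ∈ win A l j
          · rw [if_pos hm, if_neg (by rw [hmem] at hm; omega)]
            omega
          · rw [if_neg hm]
            have : c = 1 := by
              by_contra hne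
              exact hm (hmem.mpr hne)
            rw [if_pos this]
            omega
      have := ih (j + 1) (counts.insert A[j] c) (if c = 1 then hv + 1 else hv)
        (by omega) (by omega) (by omega) hci'
      refine ⟨by omega, this.2.1, this.2.2.1, ?_, this.2.2.2.2⟩
      intro m hm1 hm2
      rcases Nat.eq_or_lt_of_le hm1 with h | h
      · rw [← h]; exact hnotcov
      · exact this.2.2.2.1 m h hm2
    · -- loop exits: already covering
      have hcond : ¬ (j < A.length ∧ hv < dcount A) := fun h => hlt h.2
      rw [bAdvance, dif_neg hcond]
      refine ⟨le_refl _, hj, hci, fun m h1 h2 => absurd h2 (by omega), Or.inr ?_⟩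
      have := dcount_lt_iff A l j
      have hle := dcount_le _ _ (win_subset A l j)
      obtain ⟨_, hhv⟩ := hci
      by_contra hc
      rw [← this] at hc
      omega

theorem bLoop_spec (A : List Int) (hA : A ≠ []) :
    ∀ (k l j : Nat) (counts : PySem.Dict Int Int) (hv : Int) (best : Int),
      A.length - l = k → l ≤ j → j ≤ A.length → CI A l j counts hv →
      (∀ m, m < j → ¬ covP A l m) →
      (∀ y, (∃ l' j' : Nat, l' < l ∧ l' < j' ∧ j' ≤ A.length ∧ covP A l' j' ∧
        y = (j' : Int) - (l' : Int)) → best ≤ y) →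
      ((l = 0 ∧ best = (A.length : Int)) ∨ SS A best) →
      SS A (bLoop A A.length (dcount A) l j counts hv best) ∧
        ∀ y, SS A y → bLoop A A.length (dcount A) l j counts hv best ≤ y := by
  have hn : 0 < A.length := List.length_pos_iff.mpr hA
  intro k
  induction k with
  | zero =>
    intro l j counts hv best hk hlj hj hci hmin hbest hbs
    have hl : l = A.length := by omega
    have hcond : ¬ l < A.length := by omega
    rw [bLoop, dif_neg hcond]
    constructor
    · rcases hbs with ⟨h0, _⟩ | h
      · omega
      · exact h
    · rintro y ⟨l', j', h2, h3, h4, h5⟩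
      exact hbest y ⟨l', j', by omega, h2, h3, h4, h5⟩
  | succ k ih =>
    intro l j counts hv best hk hlj hj hci hmin hbest hbs
    have hl : l < A.length := by omega
    rw [bLoop, dif_pos hl]
    obtain ⟨hr1, hr2, hrci, hrmin, hrcov⟩ :=
      bAdvance_spec A l (A.length - j) j counts hv rfl hlj hj hci
    set r := bAdvance A A.length (dcount A) j counts hv with hrdef
    -- full minimality below r.1
    have hminfull : ∀ m, m < r.1 → ¬ covP A l m := by
      intro m hm
      by_cases h : m < j
      · exact hmin m h
      · exact hrmin m (by omega) hm
    by_cases hbreak : r.2.2 < dcount A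
    · -- break: window [l, n) does not cover
      rw [if_pos hbreak]
      have hnotcov : ¬ covP A l r.1 := by
        rw [← dcount_lt_iff]
        obtain ⟨_, hhv⟩ := hrci
        omega
      have hr1n : r.1 = A.length := by
        rcases hrcov with h | h
        · exact h
        · exact absurd h hnotcov
      have hnocov_l : ¬ covP A l A.length := by rw [← hr1n]; exact hnotcov
      have hlpos : l ≠ 0 := by
        intro h0
        subst h0
        exact hnocov_l (covP_top A)
      constructor
      · rcases hbs with ⟨h0, _⟩ | h
        · exact absurd h0 hlpos
        · exact h
      · rintro y ⟨l', j', h2, h3, h4, h5⟩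
        have hl'l : l' < l := by
          by_contra hge
          have hcn : covP A l' A.length := covP_mono A h4 h3
          exact hnocov_l (covP_anti A hcn (by omega))
        exact hbest y ⟨l', j', hl'l, h2, h3, h4, h5⟩
    · -- continue
      rw [if_neg hbreak]
      have hcov : covP A l r.1 := by
        by_contra hc
        rw [← dcount_lt_iff] at hc
        obtain ⟨_, hhv⟩ := hrci
        omega
      have hlr : l < r.1 := covP_pos A hA hcov
      have hxA : PySem.List.pyGetD A (l : Int) 0 = A[l] := by
        rw [PySem.List.pyGetD_natCast, List.getD_eq_getElem _ _ hl]
      have hwin : win A l r.1 = A[l] :: win A (l + 1) r.1 := win_cons A hlr hl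
      obtain ⟨hcnt, hhv⟩ := hrci
      simp only [hxA]
      set c := r.2.1.getD A[l] 0 - 1 with hcdef
      have hc_eq : c = ((win A (l + 1) r.1).count A[l] : Int) := by
        rw [hcdef, hcnt, hwin]
        simp [List.count_cons]
      have hci' : CI A (l + 1) r.1 (r.2.1.insert A[l] c)
          (if c = 0 then r.2.2 - 1 else r.2.2) := by
        constructor
        · intro y
          rw [PySem.Dict.getD_insert]
          by_cases hy : y = A[l]
          · subst hy
            rw [if_pos rfl]
            exact hc_eq
          · rw [if_neg hy, hcnt, hwin, List.count_cons]
            simp [hy]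
            intro h
            exact absurd (by simp [h]) hy
        · have hmem : A[l] ∈ win A (l + 1) r.1 ↔ c ≠ 0 := by
            rw [← List.count_pos_iff]
            omega
          rw [hhv, hwin, dcount_cons]
          by_cases hm : A[l] ∈ win A (l + 1) r.1
          · rw [if_pos hm, if_neg (hmem.mp hm)]
            omega
          · rw [if_neg hm, if_pos (by by_contra hne; exact hm (hmem.mpr hne))]
            omega
      set best' := if (r.1 : Int) - (l : Int) < best then (r.1 : Int) - (l : Int) else best
        with hbdef
      have hbest'le : best' ≤ (r.1 : Int) - (l : Int) ∧ best' ≤ best := by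
        rw [hbdef]
        split <;> omega
      have hbest' : ∀ y, (∃ l' j' : Nat, l' < l + 1 ∧ l' < j' ∧ j' ≤ A.length ∧
          covP A l' j' ∧ y = (j' : Int) - (l' : Int)) → best' ≤ y := by
        rintro y ⟨l', j', h1, h2, h3, h4, h5⟩
        by_cases hll : l' < l
        · exact le_trans hbest'le.2 (hbest y ⟨l', j', hll, h2, h3, h4, h5⟩)
        · have : l' = l := by omega
          subst this
          have hj' : r.1 ≤ j' := by
            by_contra hlt
            exact hminfull j' (by omega) h4
          have : (r.1 : Int) - (l' : Int) ≤ y := by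
            rw [h5]
            have : (r.1 : Int) ≤ (j' : Int) := by exact_mod_cast hj'
            omega
          exact le_trans hbest'le.1 this
      have hbs' : ((l + 1 = 0 ∧ best' = (A.length : Int)) ∨ SS A best') := by
        right
        rw [hbdef]
        split
        · exact ⟨l, r.1, hlr, hr2, hcov, rfl⟩
        · rcases hbs with ⟨h0, hbn⟩ | h
          · -- best = n and not (r.1 - l < best) with l = 0 forces r.1 = n
            subst h0
            rename_i hnotlt
            have h2 : (r.1 : Int) ≤ (A.length : Int) := by exact_mod_cast hr2
            exact ⟨0, r.1, hlr, hr2, hcov, by push_cast at *; omega⟩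
          · exact h
      have hmin' : ∀ m, m < r.1 → ¬ covP A (l + 1) m := by
        intro m hm hc
        exact hminfull m hm (covP_anti A hc (by omega))
      exact ih (l + 1) r.1 (r.2.1.insert A[l] c) (if c = 0 then r.2.2 - 1 else r.2.2)
        best' (by omega) (by omega) hr2 hci' hmin' hbest' hbs'

theorem alt_char (A : List Int) (hA : A ≠ []) :
    SS A (soluction_alt A) ∧ ∀ y, SS A y → soluction_alt A ≤ y := by
  have h0 : CI A 0 0 PySem.Dict.empty 0 := by
    constructor
    · intro x
      rw [dict_getD_empty]
      simp [win]
    · simp [win, dcount, PySem.Set.ofList]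
  have := bLoop_spec A hA A.length 0 0 PySem.Dict.empty 0 (A.length : Int)
    (by omega) (le_refl 0) (by omega) h0 (fun m hm => absurd hm (by omega))
    (by rintro y ⟨l', j', h, -⟩; exact absurd h (by omega))
    (Or.inl ⟨rfl, rfl⟩)
  rw [soluction_alt]
  simp only [need_eq]
  exact this

-- ===== A-side characterization =====

-- the body of A's inner loop as a named function (definitionally the lambda in soluctionInner)
def innerF (A : List Int) (tours : PySem.Set Int) :
    (PySem.Set Int × Int × List Int) → Int → (PySem.Set Int × Int × List Int) :=
  fun s sec =>
    let ti := PySem.Set.add s.1 (PySem.List.pyGetD A sec 0)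
    let count := s.2.1 + 1
    if PySem.Set.equal ti tours then (ti, count, s.2.2 ++ [count]) else (ti, count, s.2.2)

theorem soluctionInner_eq (A : List Int) (t : PySem.Set Int) (i : Int) (cl : List Int) :
    soluctionInner A t i cl =
      ((PySem.List.pyRange i (A.length : Int)).foldl (innerF A t)
        (PySem.Set.empty, 0, cl)).2.2 := rfl

theorem ofList_append_singleton (w : List Int) (a : Int) :
    PySem.Set.ofList (w ++ [a]) = PySem.Set.add (PySem.Set.ofList w) a := by
  rw [PySem.Set.ofList_eq_foldl, PySem.Set.ofList_eq_foldl, List.foldl_append]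
  rfl

theorem equal_cov (A w : List Int) (hsub : w ⊆ A) :
    (PySem.Set.equal (PySem.Set.ofList w) (PySem.Set.ofList A) = true) ↔ (∀ x ∈ A, x ∈ w) := by
  rw [PySem.Set.equal_iff]
  constructor
  · intro h x hx
    exact (PySem.Set.mem_ofList w x).mp ((h x).mpr ((PySem.Set.mem_ofList A x).mpr hx))
  · intro h x
    rw [PySem.Set.mem_ofList, PySem.Set.mem_ofList]
    exact ⟨fun hx => hsub hx, fun hx => h x hx⟩

theorem inner_spec (A : List Int) (l : Nat) :
    ∀ (k m : Nat) (acc : List Int), A.length - m = k → l ≤ m → m ≤ A.length →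
    ∃ L : List Int,
      ((PySem.List.pyRange (m : Int) (A.length : Int)).foldl (innerF A (PySem.Set.ofList A))
        (PySem.Set.ofList (win A l m), (m : Int) - (l : Int), acc)).2.2 = acc ++ L ∧
      ∀ x, x ∈ L ↔ ∃ j : Nat, m < j ∧ j ≤ A.length ∧ covP A l j ∧ x = (j : Int) - (l : Int) := by
  intro k
  induction k with
  | zero =>
    intro m acc hk hlm hm
    have hm' : m = A.length := by omega
    rw [PySem.List.pyRange_one_eq_nil (by exact_mod_cast hm'.ge)]
    refine ⟨[], by simp, ?_⟩
    intro x
    simp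
    intro j h1 h2 _
    omega
  | succ k ih =>
    intro m acc hk hlm hm
    have hmn : m < A.length := by omega
    rw [PySem.List.pyRange_one_cons (by exact_mod_cast hmn)]
    rw [List.foldl_cons]
    have hx : PySem.List.pyGetD A (m : Int) 0 = A[m] := by
      rw [PySem.List.pyGetD_natCast, List.getD_eq_getElem _ _ hmn]
    have hcnt : (m : Int) - (l : Int) + 1 = ((m + 1 : Nat) : Int) - (l : Int) := by
      push_cast; ring
    by_cases hcov : covP A l (m + 1)
    · have hstep : innerF A (PySem.Set.ofList A)
          (PySem.Set.ofList (win A l m), (m : Int) - (l : Int), acc) (m : Int) =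
          (PySem.Set.ofList (win A l (m + 1)), ((m + 1 : Nat) : Int) - (l : Int),
            acc ++ [((m + 1 : Nat) : Int) - (l : Int)]) := by
        unfold innerF
        rw [hx, ← ofList_append_singleton, ← win_succ A hlm hmn]
        have hb : PySem.Set.equal (PySem.Set.ofList (win A l (m + 1)))
            (PySem.Set.ofList A) = true := (equal_cov A _ (win_subset A l (m+1))).mpr hcov
        simp only [hb, if_pos, hcnt]
      rw [hstep, show ((m : Int) + 1) = ((m + 1 : Nat) : Int) by push_cast; ring]
      obtain ⟨L', hL'1, hL'2⟩ := ih (m + 1) (acc ++ [((m + 1 : Nat) : Int) - (l : Int)])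
        (by omega) (by omega) (by omega)
      refine ⟨(((m + 1 : Nat) : Int) - (l : Int)) :: L', by rw [hL'1, List.append_assoc]; rfl, ?_⟩
      intro x
      simp only [List.mem_cons, hL'2]
      constructor
      · rintro (h | ⟨j, h1, h2, h3, h4⟩)
        · exact ⟨m + 1, by omega, by omega, hcov, h⟩
        · exact ⟨j, by omega, h2, h3, h4⟩
      · rintro ⟨j, h1, h2, h3, h4⟩
        by_cases hj : j = m + 1
        · subst hj
          exact Or.inl h4
        · exact Or.inr ⟨j, by omega, h2, h3, h4⟩
    · have hstep : innerF A (PySem.Set.ofList A)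
          (PySem.Set.ofList (win A l m), (m : Int) - (l : Int), acc) (m : Int) =
          (PySem.Set.ofList (win A l (m + 1)), ((m + 1 : Nat) : Int) - (l : Int), acc) := by
        unfold innerF
        rw [hx, ← ofList_append_singleton, ← win_succ A hlm hmn]
        have hb : ¬ PySem.Set.equal (PySem.Set.ofList (win A l (m + 1)))
            (PySem.Set.ofList A) = true := fun h =>
          hcov ((equal_cov A _ (win_subset A l (m+1))).mp h)
        simp only [Bool.not_eq_true] at hb
        simp only [hb, hcnt]
        rfl
      rw [hstep, show ((m : Int) + 1) = ((m + 1 : Nat) : Int) by push_cast; ring]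
      obtain ⟨L', hL'1, hL'2⟩ := ih (m + 1) acc (by omega) (by omega) (by omega)
      refine ⟨L', hL'1, ?_⟩
      intro x
      rw [hL'2]
      constructor
      · rintro ⟨j, h1, h2, h3, h4⟩
        exact ⟨j, by omega, h2, h3, h4⟩
      · rintro ⟨j, h1, h2, h3, h4⟩
        by_cases hj : j = m + 1
        · subst hj
          exact absurd h3 hcov
        · exact ⟨j, by omega, h2, h3, h4⟩

theorem soluctionInner_spec (A : List Int) (l : Nat) (hl : l ≤ A.length) (acc : List Int) :
    ∃ L, soluctionInner A (PySem.Set.ofList A) (l : Int) acc = acc ++ L ∧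
      ∀ x, x ∈ L ↔ ∃ j : Nat, l < j ∧ j ≤ A.length ∧ covP A l j ∧ x = (j : Int) - (l : Int) := by
  obtain ⟨L, h1, h2⟩ := inner_spec A l (A.length - l) l acc rfl (le_refl l) hl
  refine ⟨L, ?_, h2⟩
  rw [soluctionInner_eq]
  rw [show (PySem.Set.empty : PySem.Set Int) = PySem.Set.ofList (win A l l) by
        rw [win_self]; rfl,
      show (0 : Int) = (l : Int) - (l : Int) by ring]
  exact h1

theorem outer_fold (A : List Int) :
    ∀ (ps : List (Int × Int)) (acc : List Int),
      (∀ p ∈ ps, ∃ lp : Nat, p.1 = (lp : Int) ∧ lp ≤ A.length) →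
      ∃ L, ps.foldl (fun cl p => soluctionInner A (PySem.Set.ofList A) p.1 cl) acc = acc ++ L ∧
        (∀ x, x ∈ L ↔ ∃ p ∈ ps, ∃ lp : Nat, p.1 = (lp : Int) ∧
          ∃ j : Nat, lp < j ∧ j ≤ A.length ∧ covP A lp j ∧ x = (j : Int) - (lp : Int)) := by
  intro ps
  induction ps with
  | nil =>
    intro acc _
    exact ⟨[], by simp, by simp⟩
  | cons p ps ih =>
    intro acc hps
    obtain ⟨lp, hlp1, hlp2⟩ := hps p (by simp)
    obtain ⟨L1, hL11, hL12⟩ := soluctionInner_spec A lp hlp2 acc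
    obtain ⟨L2, hL21, hL22⟩ := ih (acc ++ L1) (fun q hq => hps q (by simp [hq]))
    refine ⟨L1 ++ L2, ?_, ?_⟩
    · rw [List.foldl_cons, hlp1, hL11, hL21, List.append_assoc]
    · intro x
      rw [List.mem_append, hL12, hL22]
      constructor
      · rintro (⟨j, h1, h2, h3, h4⟩ | ⟨q, hq, h⟩)
        · exact ⟨p, by simp, lp, hlp1, j, h1, h2, h3, h4⟩
        · exact ⟨q, by simp [hq], h⟩
      · rintro ⟨q, hq, lq, hlq, j, h1, h2, h3, h4⟩
        rcases List.mem_cons.mp hq with h | h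
        · subst h
          left
          have : lq = lp := by
            have := hlp1 ▸ hlq
            exact_mod_cast this.symm
          subst this
          exact ⟨j, h1, h2, h3, h4⟩
        · right
          exact ⟨q, h, lq, hlq, j, h1, h2, h3, h4⟩

theorem countlist_iff (A : List Int) (x : Int) :
    x ∈ (PySem.List.enumerate A).foldl
      (fun cl p => soluctionInner A (PySem.Set.ofList A) p.1 cl) [] ↔ SS A x := by
  obtain ⟨L, h1, h2⟩ := outer_fold A (PySem.List.enumerate A) [] (by
    intro p hp
    rw [PySem.List.mem_enumerate_iff] at hp
    obtain ⟨kk, hkk, hpk⟩ := hp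
    exact ⟨kk, by rw [hpk]; simp, by omega⟩)
  rw [h1, List.nil_append, h2]
  constructor
  · rintro ⟨p, hp, lp, hlp, j, h1', h2', h3', h4'⟩
    exact ⟨lp, j, h1', h2', h3', h4'⟩
  · rintro ⟨l, j, h1', h2', h3', h4'⟩
    have hln : l < A.length := by omega
    refine ⟨((l : Int), A[l]), ?_, l, rfl, j, h1', h2', h3', h4'⟩
    rw [PySem.List.mem_enumerate_iff]
    exact ⟨l, hln, by simp⟩

theorem soluction_char (A : List Int) (hA : A ≠ []) :
    SS A (soluction A) ∧ ∀ y, SS A y → soluction A ≤ y := by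
  have hn : 0 < A.length := List.length_pos_iff.mpr hA
  set CL := (PySem.List.enumerate A).foldl
    (fun cl p => soluctionInner A (PySem.Set.ofList A) p.1 cl) [] with hCL
  have hSn : SS A ((A.length : Int) - (0 : Int)) :=
    ⟨0, A.length, hn, le_refl _, covP_top A, rfl⟩
  have hne : CL ≠ [] := by
    have : ((A.length : Int) - (0 : Int)) ∈ CL := (countlist_iff A _).mpr hSn
    exact List.ne_nil_of_mem this
  obtain ⟨m, hm⟩ : ∃ m, PySem.List.min? CL (fun x => x) = some m := by
    cases h : PySem.List.min? CL (fun x => x) with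
    | none => exact absurd ((PySem.List.min?_eq_none_iff CL _).mp h) hne
    | some m => exact ⟨m, rfl⟩
  have hsol : soluction A = m := by
    rw [soluction]
    simp only [← hCL, hm, Option.getD_some]
  rw [hsol]
  refine ⟨(countlist_iff A m).mp (PySem.List.min?_mem hm), ?_⟩
  intro y hy
  exact PySem.List.min?_isMin hm y ((countlist_iff A y).mpr hy)

-- ===== VERDICT (by name: the statement is the Claim_ definition above) =====
theorem soluction_spec : Claim_equal_soluction := by
  intro A _ hpre
  show soluction A = soluction_alt A
  obtain ⟨hS1, hB1⟩ := soluction_char A hpre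
  obtain ⟨hS2, hB2⟩ := alt_char A hpre
  exact le_antisymm (hB1 _ hS2) (hB2 _ hS1)
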